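-- pv_equiv track=rewrite | github.com/liskos/leonenko | варианты/вариант крылова/12/15.py | f
-- ===== SOURCE A (Python) =====
-- def f(a):
--     b = range(4, 18 + 1)
--     c = range(12, 40 + 1)
--
--     for x in range(1, 1000):
--         f = (x in a) or ((x in b) == (x in c))
--         if not f:
--             return False
--     return True
-- ===== SOURCE B (Python) =====
-- def f(a):
--     s = set(a)
--     bad = list(range(4, 12)) + list(range(19, 41))
--     return all(x in s for x in bad)
-- ===== Notes on version B (the rewrite author's own statement) =====
-- stated objective: simpler
-- what changed: Instead of scanning all x in 1..999 and testing the combined predicate, B precomputes the only values where the range-predicate fails ({4..11} U {19..40}) and checks that those 30 values are all in a set built from a.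
import Mathlib
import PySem

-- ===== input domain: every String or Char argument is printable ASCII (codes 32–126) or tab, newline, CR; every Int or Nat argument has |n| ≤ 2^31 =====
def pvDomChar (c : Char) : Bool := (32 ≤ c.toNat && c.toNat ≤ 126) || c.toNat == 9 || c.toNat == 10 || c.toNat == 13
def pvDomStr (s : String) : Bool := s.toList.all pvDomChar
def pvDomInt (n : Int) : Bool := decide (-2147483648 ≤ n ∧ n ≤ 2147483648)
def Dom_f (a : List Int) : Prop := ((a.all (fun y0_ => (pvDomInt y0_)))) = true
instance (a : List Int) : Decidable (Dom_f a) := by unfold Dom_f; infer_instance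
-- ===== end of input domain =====

-- B replaces the scan of 1..999 by a direct subset check of the 30 values {4..11} U {19..40}
-- where the range-predicate fails (objective: simpler).
-- ===== PORT A =====
def fLoop (a : List Int) : List Int → Bool
  | [] => true
  | x :: xs =>
      if !(a.contains x
            || ((PySem.List.pyRange 4 19 1).contains x == (PySem.List.pyRange 12 41 1).contains x)) then
        false
      else fLoop a xs

def f (a : List Int) : Bool := fLoop a (PySem.List.pyRange 1 1000 1)

-- ===== PORT B =====
def f_alt (a : List Int) : Bool :=
  (PySem.List.pyRange 4 12 1 ++ PySem.List.pyRange 19 41 1).all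
    (fun x => PySem.Set.contains (PySem.Set.ofList a) x)

-- ===== PRECONDITION & SPEC =====
def Spec_f (a : List Int) (out : Bool) : Prop := out = f_alt a
instance (a : List Int) (out : Bool) : Decidable (Spec_f a out) := by unfold Spec_f; infer_instance

-- ===== CLAIM (what is proved, stated in full; the proofs are below) =====
def Claim_equal_f : Prop := ∀ (a : List Int), Dom_f a → Spec_f a (f a)

-- ===== LEMMAS AND PROOFS =====
theorem fLoop_eq_all (a l : List Int) :
    fLoop a l = l.all (fun x => a.contains x
      || ((PySem.List.pyRange 4 19 1).contains x == (PySem.List.pyRange 12 41 1).contains x)) := by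
  induction l with
  | nil => rfl
  | cons x xs ih =>
      simp only [fLoop, List.all_cons, ih]
      cases h : (a.contains x
        || ((PySem.List.pyRange 4 19 1).contains x == (PySem.List.pyRange 12 41 1).contains x)) <;>
        simp [h]

theorem contains_pyRange (a b x : Int) :
    (PySem.List.pyRange a b 1).contains x = decide (a ≤ x ∧ x < b) := by
  rw [Bool.eq_iff_iff]
  simp [List.contains_iff_mem, PySem.List.mem_pyRange_one]

theorem contains_ofList (a : List Int) (x : Int) :
    PySem.Set.contains (PySem.Set.ofList a) x = a.contains x := by
  simp [PySem.Set.contains, PySem.Set.mem_ofList, List.contains_iff_mem]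

-- ===== VERDICT (by name: the statement is the Claim_ definition above) =====
set_option maxRecDepth 8192 in
theorem f_spec : Claim_equal_f := by
  intro a _
  unfold Spec_f f f_alt
  rw [fLoop_eq_all, Bool.eq_iff_iff]
  simp only [List.all_eq_true, List.all_append, Bool.and_eq_true, contains_ofList,
    contains_pyRange, PySem.List.mem_pyRange_one, List.contains_iff_mem, Bool.or_eq_true,
    beq_iff_eq, decide_eq_decide, decide_eq_true_eq]
  constructor
  · intro h
    constructor <;> intro x hx <;>
      rcases h x (by omega) with hc | hiff
    · exact hc
    · exfalso; omega
    · exact hc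
    · exfalso; omega
  · rintro ⟨h1, h2⟩ x hx
    by_cases hb : (4 ≤ x ∧ x < 12)
    · exact Or.inl (h1 x hb)
    · by_cases hc : (19 ≤ x ∧ x < 41)
      · exact Or.inl (h2 x hc)
      · right; omega
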